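-- pv_equiv track=rewrite | github.com/cortonemo/bardos-do-mondego | tools/remove_lines_gui.py | find_matches_in_file
-- ===== SOURCE A (Python) =====
-- from typing import Iterable, List, Tuple
--
-- def normalize_line(s: str) -> str:
--     # Compare lines without trailing spaces or \r\n noise
--     return s.rstrip()
--
-- def find_matches_in_file(text: str, targets: List[str], contains: bool) -> List[Tuple[int, str]]:
--     """
--     Return list of (lineno, line_text) that match any target.
--     """
--     lines = text.splitlines(keepends=False)
--     hits: List[Tuple[int, str]] = []
--     for i, line in enumerate(lines, start=1):
--         norm = normalize_line(line)
--         if contains: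
--             if any(t in norm for t in targets):
--                 hits.append((i, line))
--         else:
--             if any(norm == t for t in targets):
--                 hits.append((i, line))
--     return hits
-- ===== SOURCE B (Python) =====
-- from typing import List, Tuple
--
-- def find_matches_in_file(text: str, targets: List[str], contains: bool) -> List[Tuple[int, str]]:
--     lines = text.splitlines()
--     hit = set()
--     for t in targets:
--         for idx, line in enumerate(lines):
--             norm = line.rstrip()
--             if (t in norm) if contains else (norm == t):
--                 hit.add(idx)
--     return [(i + 1, lines[i]) for i in sorted(hit)]
-- ===== Notes on version B (the rewrite author's own statement) =====
-- stated objective: alternative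
-- what changed: B transposes the loops (targets outer, lines inner), collects matching line indices in a deduplicating set instead of a per-line any() scan, and emits the hits by sorting the index set at the end.
import Mathlib
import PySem

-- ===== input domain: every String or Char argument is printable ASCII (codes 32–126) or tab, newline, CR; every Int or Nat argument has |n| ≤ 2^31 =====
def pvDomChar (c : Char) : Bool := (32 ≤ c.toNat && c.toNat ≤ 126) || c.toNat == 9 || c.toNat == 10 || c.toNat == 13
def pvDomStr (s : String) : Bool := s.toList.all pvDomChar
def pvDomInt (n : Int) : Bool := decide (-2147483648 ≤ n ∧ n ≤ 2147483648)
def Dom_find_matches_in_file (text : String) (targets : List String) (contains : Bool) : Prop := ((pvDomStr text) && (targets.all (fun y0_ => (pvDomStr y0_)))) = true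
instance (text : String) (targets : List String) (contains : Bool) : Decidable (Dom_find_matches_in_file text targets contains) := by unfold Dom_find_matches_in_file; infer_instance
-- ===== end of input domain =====

-- B transposes the loops (targets outer, lines inner), collecting matching line indices in a
-- deduplicating set and emitting the hits by sorting the index set — an alternative of the same cost.

-- ===== PORT A =====
def normalize_line (s : String) : String := PySem.Str.rstrip s

def find_matches_in_file (text : String) (targets : List String) (contains : Bool) : List (Int × String) :=
  let lines := PySem.Str.splitlines text
  (PySem.List.enumerate lines 1).foldl (fun hits p =>
    let norm := normalize_line p.2
    if contains then
      if targets.any (fun t => PySem.Str.isIn t norm) then hits ++ [p] else hits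
    else
      if targets.any (fun t => norm == t) then hits ++ [p] else hits) []

-- ===== PORT B =====
def find_matches_in_file_alt (text : String) (targets : List String) (contains : Bool) : List (Int × String) :=
  let lines := PySem.Str.splitlines text
  let hit : PySem.Set Int := targets.foldl (fun s t =>
    (PySem.List.enumerate lines 0).foldl (fun s p =>
      let norm := PySem.Str.rstrip p.2
      if (if contains then PySem.Str.isIn t norm else norm == t)
      then PySem.Set.add s p.1 else s) s) PySem.Set.empty
  (PySem.List.sorted hit (fun i => i) false).map (fun i => (i + 1, PySem.List.pyGetD lines i ""))

-- ===== PRECONDITION & SPEC =====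
def Spec_find_matches_in_file (text : String) (targets : List String) (contains : Bool) (out : List (Int × String)) : Prop := out = find_matches_in_file_alt text targets contains
instance (text : String) (targets : List String) (contains : Bool) (out : List (Int × String)) : Decidable (Spec_find_matches_in_file text targets contains out) := by unfold Spec_find_matches_in_file; infer_instance

-- ===== CLAIM (what is proved, stated in full; the proofs are below) =====
def Claim_equal_find_matches_in_file : Prop := ∀ (text : String) (targets : List String) (contains : Bool), Dom_find_matches_in_file text targets contains → Spec_find_matches_in_file text targets contains (find_matches_in_file text targets contains)

-- ===== LEMMAS AND PROOFS =====

-- conditional add over a list = Set.update with the filtered, projected list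
theorem foldl_add_if_eq_update {α β : Type} [BEq β] [LawfulBEq β]
    (c : α → Bool) (g : α → β) (l : List α) (s : PySem.Set β) :
    l.foldl (fun s p => if c p then PySem.Set.add s (g p) else s) s
      = PySem.Set.update s ((l.filter c).map g) := by
  induction l generalizing s with
  | nil => simp [PySem.Set.update]
  | cons a l ih =>
    by_cases h : c a = true
    · simp [h, ih, PySem.Set.update_map_eq_foldl_add]
    · simp [h, ih]

-- membership in a fold of Set.update
theorem mem_foldl_update {α β : Type} [BEq β] [LawfulBEq β]
    (F : α → List β) (ts : List α) (s0 : PySem.Set β) (y : β) :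
    y ∈ ts.foldl (fun s t => PySem.Set.update s (F t)) s0 ↔ y ∈ s0 ∨ ∃ t ∈ ts, y ∈ F t := by
  induction ts generalizing s0 with
  | nil => simp
  | cons a ts ih => simp [ih, PySem.Set.mem_update]; tauto

-- a fold of Set.update preserves Nodup
theorem nodup_foldl_update {α β : Type} [BEq β] [LawfulBEq β]
    (F : α → List β) (ts : List α) (s0 : PySem.Set β) (h : s0.Nodup) :
    (ts.foldl (fun s t => PySem.Set.update s (F t)) s0).Nodup := by
  induction ts generalizing s0 with
  | nil => exact h
  | cons a ts ih => exact ih _ (PySem.Set.nodup_update _ _ h)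

-- enumerate at start s+1 is enumerate at s with indices shifted by one
theorem enumerate_succ_shift {α : Type} (xs : List α) (s : Int) :
    PySem.List.enumerate xs (s + 1) = (PySem.List.enumerate xs s).map (fun p => (p.1 + 1, p.2)) := by
  induction xs generalizing s with
  | nil => simp [PySem.List.enumerate]
  | cons x xs ih => simp [PySem.List.enumerate_cons, ih]

-- the core equivalence, for an arbitrary per-target per-line test
theorem main_branch (lines targets : List String) (cond : String → String → Bool) :
    (PySem.List.sorted
        (targets.foldl (fun s t =>
          (PySem.List.enumerate lines 0).foldl (fun s p =>
            if cond t p.2 then PySem.Set.add s p.1 else s) s) PySem.Set.empty)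
      (fun i => i) false).map (fun i => (i + 1, PySem.List.pyGetD lines i ""))
    = (PySem.List.enumerate lines 1).foldl (fun hits p =>
        if targets.any (fun t => cond t p.2) then hits ++ [p] else hits) [] := by
  have hA : (PySem.List.enumerate lines 1).foldl (fun hits p =>
        if targets.any (fun t => cond t p.2) then hits ++ [p] else hits) []
      = (PySem.List.enumerate lines 1).filter (fun p => targets.any (fun t => cond t p.2)) := by
    simpa using PySem.List.foldl_append_if (fun p => targets.any (fun t => cond t p.2)) id
      (PySem.List.enumerate lines 1) []
  set E0 := PySem.List.enumerate lines 0 with hE0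
  set q : Int × String → Bool := fun p => targets.any (fun t => cond t p.2) with hq
  set ys : List Int := (E0.filter q).map (·.1) with hys
  set hit := targets.foldl (fun s t =>
      E0.foldl (fun s p => if cond t p.2 then PySem.Set.add s p.1 else s) s) PySem.Set.empty with hhit
  have hhit' : hit = targets.foldl (fun s t =>
      PySem.Set.update s ((E0.filter (fun p => cond t p.2)).map (·.1))) PySem.Set.empty := by
    rw [hhit]
    simp only [foldl_add_if_eq_update]
  have hys_pw : ys.Pairwise (· < ·) := by
    rw [hys]
    rw [List.pairwise_map]
    exact (PySem.List.pairwise_lt_enumerate lines 0).filter q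
  have hys_nodup : ys.Nodup := hys_pw.imp (fun h => ne_of_lt h)
  have hhit_nodup : hit.Nodup := by
    rw [hhit']
    exact nodup_foldl_update _ _ _ (by simp [PySem.Set.empty])
  have hmem : ∀ y, y ∈ ys ↔ y ∈ hit := by
    intro y
    rw [hhit', mem_foldl_update]
    simp only [hys, hq, List.mem_map, List.mem_filter, List.any_eq_true, PySem.Set.empty,
      List.not_mem_nil, false_or]
    constructor
    · rintro ⟨p, ⟨hp, t, ht, hc⟩, rfl⟩
      exact ⟨t, ht, p, ⟨hp, hc⟩, rfl⟩
    · rintro ⟨t, ht, p, ⟨hp, hc⟩, rfl⟩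
      exact ⟨p, ⟨hp, t, ht, hc⟩, rfl⟩
  have hperm : ys.Perm hit := (List.perm_ext_iff_of_nodup hys_nodup hhit_nodup).2 hmem
  have hsorted : PySem.List.sorted hit (fun i => i) false = ys :=
    PySem.List.sorted_eq_of_perm_of_pairwise_lt hit ys (fun i => i) hperm
      (by simpa using hys_pw)
  rw [hsorted, hA]
  have hE1 : PySem.List.enumerate lines 1 = E0.map (fun p => (p.1 + 1, p.2)) := by
    simpa using enumerate_succ_shift lines 0
  rw [hE1, List.filter_map]
  have hqcomp : (q ∘ fun p : Int × String => (p.1 + 1, p.2)) = q := by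
    funext p; simp [hq]
  rw [hqcomp, hys, List.map_map]
  apply List.map_congr_left
  intro p hp
  have hpE : p ∈ E0 := List.mem_of_mem_filter hp
  rw [hE0, PySem.List.mem_enumerate_iff] at hpE
  obtain ⟨k, hk, rfl⟩ := hpE
  simp [PySem.List.pyGetD_natCast, List.getD, List.getElem?_eq_getElem hk]

-- ===== VERDICT (by name: the statement is the Claim_ definition above) =====
theorem find_matches_in_file_spec : Claim_equal_find_matches_in_file := by
  intro text targets contains _
  unfold Spec_find_matches_in_file find_matches_in_file find_matches_in_file_alt normalize_line
  cases contains
  · simpa using (main_branch (PySem.Str.splitlines text) targets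
      (fun t line => PySem.Str.rstrip line == t)).symm
  · simpa using (main_branch (PySem.Str.splitlines text) targets
      (fun t line => PySem.Str.isIn t (PySem.Str.rstrip line))).symm
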